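-- pv_equiv track=rewrite | github.com/mohammad59mt/active_link_monitoring | Path_and_Flow_Selector.py | convert_linkBasedPath_to_nodeBasedPath
-- ===== SOURCE A (Python) =====
-- def convert_linkBasedPath_to_nodeBasedPath(link_based_path, src):
--     path = list(link_based_path)
--     node_based_path = [src]
--     for _ in range(len(path)):
--         for element in path:
--             if element[0] == src:
--                 src = element[1]
--                 node_based_path.append(element[1])
--                 path.remove(element)
--                 break
--     return node_based_path
-- ===== SOURCE B (Python) =====
-- def convert_linkBasedPath_to_nodeBasedPath(link_based_path, src):
--     # Build a map source-node -> queue of next-nodes in one pass, then follow the chain.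
--     nxt = {}
--     for e in link_based_path:
--         nxt.setdefault(e[0], []).append(e[1])
--     node_based_path = [src]
--     for _ in range(len(link_based_path)):
--         q = nxt.get(src)
--         if not q:
--             break
--         src = q.pop(0)
--         node_based_path.append(src)
--     return node_based_path
-- ===== Notes on version B (the rewrite author's own statement) =====
-- stated objective: faster
-- what changed: Replaces A's quadratic repeated linear scan-and-remove of the remaining link list with a dict from source node to the queue of next nodes built in one pass, then follows the chain with O(1) lookups.
-- outside the precondition, e.g. on convert_linkBasedPath_to_nodeBasedPath([(5,)], 0): A returns [0], B raises IndexError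
import Mathlib
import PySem

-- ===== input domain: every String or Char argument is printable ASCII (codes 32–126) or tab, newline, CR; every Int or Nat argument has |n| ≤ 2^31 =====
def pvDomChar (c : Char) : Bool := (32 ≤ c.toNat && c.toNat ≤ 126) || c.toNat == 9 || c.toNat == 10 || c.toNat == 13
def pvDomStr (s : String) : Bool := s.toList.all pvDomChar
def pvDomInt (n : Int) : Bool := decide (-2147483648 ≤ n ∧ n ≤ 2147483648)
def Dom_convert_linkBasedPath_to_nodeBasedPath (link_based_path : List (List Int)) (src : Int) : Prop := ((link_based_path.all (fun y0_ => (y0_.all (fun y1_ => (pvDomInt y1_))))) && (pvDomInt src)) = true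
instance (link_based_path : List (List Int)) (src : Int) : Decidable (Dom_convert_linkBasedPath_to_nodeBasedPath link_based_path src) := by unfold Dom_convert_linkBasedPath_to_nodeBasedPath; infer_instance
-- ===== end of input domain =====

-- B replaces A's quadratic scan-and-remove with a one-pass dict (source node -> queue of
-- next nodes) followed by an O(1)-lookup chain walk; equivalence is about the return value.


-- ===== PORT A =====
-- One outer iteration of A: scan `path` for the first element with element[0] == src
-- (the `for element in path: if …: break` loop = find?); if found, remove it (path.remove),
-- advance src and append.  element[0]/element[1] are ported as pyGetD …, exact under Pre_
-- (every link has length ≥ 2; where Python would raise IndexError the input is outside Pre_).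
def pvAStep (st : List (List Int) × Int × List Int) : List (List Int) × Int × List Int :=
  match st.1.find? (fun e => PySem.List.pyGetD e 0 0 == st.2.1) with
  | none => st
  | some e => ((PySem.List.remove? st.1 e).getD st.1,
               PySem.List.pyGetD e 1 0,
               st.2.2 ++ [PySem.List.pyGetD e 1 0])

def convert_linkBasedPath_to_nodeBasedPath (link_based_path : List (List Int)) (src : Int) : List Int :=
  ((List.range link_based_path.length).foldl (fun st _ => pvAStep st)
      (link_based_path, src, [src])).2.2

-- ===== PORT B =====
-- Source B's chain walk: `q = nxt.get(src); if not q: break; src = q.pop(0); …`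
-- fuel = len(link_based_path), exactly Source B's `for _ in range(len(link_based_path))`.
def pvBLoop : Nat → PySem.Dict Int (List Int) → Int → List Int → List Int
  | 0, _, _, acc => acc
  | n + 1, d, s, acc =>
    match d.get? s with
    | some (t :: rest) => pvBLoop n (d.insert s rest) t (acc ++ [t])
    | _ => acc

def convert_linkBasedPath_to_nodeBasedPath_alt (link_based_path : List (List Int)) (src : Int) : List Int :=
  -- nxt.setdefault(e[0], []).append(e[1])  =  Dict.modify key [] (· ++ [val])
  let d := link_based_path.foldl
    (fun d e => d.modify (PySem.List.pyGetD e 0 0) [] (· ++ [PySem.List.pyGetD e 1 0]))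
    PySem.Dict.empty
  pvBLoop link_based_path.length d src [src]

-- ===== PRECONDITION & SPEC =====
-- Pre_ excludes paths containing a link with fewer than two endpoints: on such inputs A
-- raises IndexError whenever the short link is reached during a scan (and whether it is
-- reached is an accident of scan order), while B always reads both endpoints and raises.
def Pre_convert_linkBasedPath_to_nodeBasedPath (link_based_path : List (List Int)) (src : Int) : Prop :=
  ∀ e ∈ link_based_path, 2 ≤ e.length
instance (link_based_path : List (List Int)) (src : Int) : Decidable (Pre_convert_linkBasedPath_to_nodeBasedPath link_based_path src) := by unfold Pre_convert_linkBasedPath_to_nodeBasedPath; infer_instance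

def pvWitness_convert_linkBasedPath_to_nodeBasedPath : List (List Int) × Int := ([[1, 2], [2, 3]], 1)

def Spec_convert_linkBasedPath_to_nodeBasedPath (link_based_path : List (List Int)) (src : Int) (out : List Int) : Prop := out = convert_linkBasedPath_to_nodeBasedPath_alt link_based_path src
instance (link_based_path : List (List Int)) (src : Int) (out : List Int) : Decidable (Spec_convert_linkBasedPath_to_nodeBasedPath link_based_path src out) := by unfold Spec_convert_linkBasedPath_to_nodeBasedPath; infer_instance

-- ===== CLAIM (what is proved, stated in full; the proofs are below) =====
def Claim_equal_convert_linkBasedPath_to_nodeBasedPath : Prop := ∀ (link_based_path : List (List Int)) (src : Int), Dom_convert_linkBasedPath_to_nodeBasedPath link_based_path src → Pre_convert_linkBasedPath_to_nodeBasedPath link_based_path src → Spec_convert_linkBasedPath_to_nodeBasedPath link_based_path src (convert_linkBasedPath_to_nodeBasedPath link_based_path src)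

-- ===== LEMMAS AND PROOFS =====

-- the queue of next-nodes for source node k among the remaining links, in order
def pvTails (k : Int) (path : List (List Int)) : List Int :=
  (path.filter (fun e => PySem.List.pyGetD e 0 0 == k)).map (fun e => PySem.List.pyGetD e 1 0)

-- a foldl whose step ignores the list element is an iterate
theorem pv_foldl_const {α β : Type} (g : α → α) (l : List β) (st : α) :
    l.foldl (fun st _ => g st) st = g^[l.length] st := by
  induction l generalizing st with
  | nil => rfl
  | cons x l ih => simp [List.foldl, ih, Function.iterate_succ_apply]

theorem pv_filter_erase_of_neg {α : Type} [BEq α] [LawfulBEq α] (q : α → Bool) (e : α)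
    (he : q e = false) : ∀ l : List α, (l.erase e).filter q = l.filter q := by
  intro l
  induction l with
  | nil => rfl
  | cons x l ih =>
    by_cases hx : x = e
    · subst hx; simp [he]
    · have hbe : (x == e) = false := beq_false_of_ne hx
      simp [hbe, List.filter_cons, ih]

theorem pv_filter_of_find? {α : Type} [BEq α] [LawfulBEq α] (p : α → Bool) (e : α) :
    ∀ l : List α, l.find? p = some e → l.filter p = e :: (l.erase e).filter p := by
  intro l
  induction l with
  | nil => intro h; simp at h
  | cons x l ih =>
    intro h
    by_cases hx : p x = true
    · rw [List.find?_cons_of_pos hx] at h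
      injection h with h; subst h
      simp [hx]
    · rw [List.find?_cons_of_neg hx] at h
      have hxe : x ≠ e := by
        intro hxe; subst hxe
        exact hx (List.find?_some h)
      have hbe : (x == e) = false := beq_false_of_ne hxe
      simp [hbe, hx, ih h]

theorem pv_main (n : Nat) :
    ∀ (path : List (List Int)) (s : Int) (acc : List Int) (d : PySem.Dict Int (List Int)),
      (∀ k, d.getD k [] = pvTails k path) →
      (pvAStep^[n] (path, s, acc)).2.2 = pvBLoop n d s acc := by
  induction n with
  | zero => intro path s acc d _; rfl
  | succ n ih =>
    intro path s acc d hd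
    rw [Function.iterate_succ_apply]
    cases hf : path.find? (fun e => PySem.List.pyGetD e 0 0 == s) with
    | none =>
      -- no link leaves s: A's step is the identity (and stays so), B breaks
      have hfix : pvAStep (path, s, acc) = (path, s, acc) := by
        simp [pvAStep, hf]
      have hiter : ∀ m, (pvAStep^[m] (path, s, acc)) = (path, s, acc) := by
        intro m
        induction m with
        | zero => rfl
        | succ m ihm => rw [Function.iterate_succ_apply, hfix, ihm]
      have htails : pvTails s path = [] := by
        unfold pvTails
        have : path.filter (fun e => PySem.List.pyGetD e 0 0 == s) = [] := by
          rw [List.filter_eq_nil_iff]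
          intro a ha
          have := List.find?_eq_none.mp hf a ha
          simpa using this
        simp [this]
      have hgd : d.getD s [] = [] := by rw [hd s, htails]
      rw [hfix, hiter]
      unfold pvBLoop
      cases hget : d.get? s with
      | none => rfl
      | some v =>
        have : v = [] := by
          have := PySem.Dict.getD_eq_get?_getD d s ([] : List Int)
          rw [hget] at this
          simpa [hgd] using this.symm
        subst this; rfl
    | some e =>
      have hmem : e ∈ path := List.mem_of_find?_eq_some hf
      have hpe : (PySem.List.pyGetD e 0 0 == s) = true := by
        have := List.find?_some hf; simpa using this
      have hstep : pvAStep (path, s, acc) =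
          (path.erase e, PySem.List.pyGetD e 1 0, acc ++ [PySem.List.pyGetD e 1 0]) := by
        simp [pvAStep, hf, PySem.List.remove?_eq_some_erase path e hmem]
      have htails : pvTails s path = PySem.List.pyGetD e 1 0 :: pvTails s (path.erase e) := by
        unfold pvTails
        rw [pv_filter_of_find? _ _ _ hf, List.map_cons]
      have hget : d.get? s = some (PySem.List.pyGetD e 1 0 :: pvTails s (path.erase e)) := by
        have hgd : d.getD s [] = PySem.List.pyGetD e 1 0 :: pvTails s (path.erase e) := by
          rw [hd s, htails]
        have h2 := PySem.Dict.getD_eq_get?_getD d s ([] : List Int)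
        cases hg : d.get? s with
        | none => rw [hg] at h2; rw [h2] at hgd; simp at hgd
        | some v =>
          rw [hg] at h2
          simp only [Option.getD_some] at h2
          rw [h2] at hgd
          rw [hgd]
      rw [hstep]
      have hrec := ih (path.erase e) (PySem.List.pyGetD e 1 0) (acc ++ [PySem.List.pyGetD e 1 0])
        (d.insert s (pvTails s (path.erase e)))
        (by
          intro k
          by_cases hk : k = s
          · subst hk
            rw [PySem.Dict.getD_insert_self]
          · rw [PySem.Dict.getD_insert_of_ne _ _ _ hk, hd k]
            unfold pvTails
            rw [pv_filter_erase_of_neg]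
            have hes : PySem.List.pyGetD e 0 0 = s := by simpa using hpe
            simp [hes]
            intro h; exact hk h.symm)
      rw [hrec]
      conv_rhs => unfold pvBLoop
      rw [hget]

theorem pv_build (lbp : List (List Int)) (k : Int) :
    (lbp.foldl (fun d e => d.modify (PySem.List.pyGetD e 0 0) [] (· ++ [PySem.List.pyGetD e 1 0]))
        PySem.Dict.empty).getD k [] = pvTails k lbp := by
  have hmap : lbp.foldl
      (fun d e => d.modify (PySem.List.pyGetD e 0 0) [] (· ++ [PySem.List.pyGetD e 1 0]))
      PySem.Dict.empty
      = (lbp.map (fun e => (PySem.List.pyGetD e 0 0, PySem.List.pyGetD e 1 0))).foldl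
        (fun d p => d.modify p.1 [] (· ++ [p.2])) PySem.Dict.empty := by
    rw [List.foldl_map]
  rw [hmap, PySem.Dict.getD_foldl_modify_append]
  unfold pvTails
  simp [PySem.Dict.getD_empty, List.filter_map, Function.comp_def]

-- ===== VERDICT (by name: the statement is the Claim_ definition above) =====
theorem convert_linkBasedPath_to_nodeBasedPath_spec : Claim_equal_convert_linkBasedPath_to_nodeBasedPath := by
  intro lbp src _ _
  unfold Spec_convert_linkBasedPath_to_nodeBasedPath
  unfold convert_linkBasedPath_to_nodeBasedPath convert_linkBasedPath_to_nodeBasedPath_alt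
  rw [pv_foldl_const pvAStep (List.range lbp.length) (lbp, src, [src])]
  simp only [List.length_range]
  exact pv_main lbp.length lbp src [src] _ (fun k => pv_build lbp k)
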